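-- pv_equiv track=rewrite | github.com/ADarvishi82/nqueens-heuristics-ai-assignment | ten_heuristic_n_queens.py | h2_min_conflicts_for_next_queen
-- ===== SOURCE A (Python) =====
-- def h1_attacking_pairs(board):
--     n = len(board)
--     threats = 0
--     placed_queens_pos = []
--     for col, row in enumerate(board):
--         if row != -1:
--             placed_queens_pos.append((col, row))
--
--     for i in range(len(placed_queens_pos)):
--         for j in range(i + 1, len(placed_queens_pos)):
--             col1, row1 = placed_queens_pos[i]
--             col2, row2 = placed_queens_pos[j]
--             if row1 == row2 or abs(row1 - row2) == abs(col1 - col2):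
--                 threats += 1
--     return threats
--
-- def h2_min_conflicts_for_next_queen(board):
--     n = len(board)
--     next_col = -1
--     for i in range(n):
--         if board[i] == -1:
--             next_col = i
--             break
--     if next_col == -1: # همه وزیران قرار گرفته‌اند
--         return h1_attacking_pairs(board) # اگر کامل است، تعداد تهدیدهای فعلی را برگردان
--
--     min_conflicts_for_this_col = float('inf')
--     possible_moves_in_col = 0
--     for r_next in range(n):
--         current_conflicts = 0
--         # بررسی تعارض با وزیران قبلی
--         for c_prev in range(next_col):
--             r_prev = board[c_prev]
--             if r_prev == r_next or abs(r_prev - r_next) == abs(c_prev - next_col):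
--                 current_conflicts += 1
--         min_conflicts_for_this_col = min(min_conflicts_for_this_col, current_conflicts)
--         possible_moves_in_col +=1
--
--     if possible_moves_in_col == 0 : # این حالت نباید رخ دهد اگر next_col معتبر باشد
--          return float('inf')
--     return min_conflicts_for_this_col
-- ===== SOURCE B (Python) =====
-- def h2_min_conflicts_for_next_queen(board):
--     n = len(board)
--     rows = {}; diag = {}; anti = {}
--     if -1 in board:
--         next_col = board.index(-1)
--         for c in range(next_col):
--             r = board[c]
--             rows[r] = rows.get(r, 0) + 1
--             diag[r - c] = diag.get(r - c, 0) + 1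
--             anti[r + c] = anti.get(r + c, 0) + 1
--         return min(rows.get(r, 0) + diag.get(r - next_col, 0) + anti.get(r + next_col, 0)
--                    for r in range(n))
--     for c, r in enumerate(board):
--         rows[r] = rows.get(r, 0) + 1
--         diag[r - c] = diag.get(r - c, 0) + 1
--         anti[r + c] = anti.get(r + c, 0) + 1
--     return sum(v * (v - 1) // 2 for d in (rows, diag, anti) for v in d.values())
-- ===== Notes on version B (the rewrite author's own statement) =====
-- stated objective: faster
-- what changed: B replaces A's nested scans with one pass building row/diagonal/anti-diagonal hash counters, so each candidate row (and, on complete boards, the attacking-pair total via sum of C(k,2) per counter) costs O(1) instead of an inner scan.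
import Mathlib
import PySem

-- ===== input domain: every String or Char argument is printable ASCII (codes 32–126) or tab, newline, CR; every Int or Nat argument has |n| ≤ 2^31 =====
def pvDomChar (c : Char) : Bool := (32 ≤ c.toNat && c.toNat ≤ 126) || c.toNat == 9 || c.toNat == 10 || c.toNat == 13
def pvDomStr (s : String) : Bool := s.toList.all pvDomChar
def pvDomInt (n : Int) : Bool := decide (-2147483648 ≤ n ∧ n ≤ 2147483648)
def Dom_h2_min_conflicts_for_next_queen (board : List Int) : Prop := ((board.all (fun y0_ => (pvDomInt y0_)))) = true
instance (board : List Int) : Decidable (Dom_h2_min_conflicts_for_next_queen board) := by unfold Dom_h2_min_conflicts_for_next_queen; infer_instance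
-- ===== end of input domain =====

-- B replaces A's nested scans by one pass over row/diagonal/anti-diagonal counters (objective: faster).

-- ===== PORT A =====
def pvPlaced (board : List Int) : List (Int × Int) :=
  (PySem.List.enumerate board).foldl
    (fun acc p => if p.2 != -1 then acc ++ [(p.1, p.2)] else acc) []

def pvH1 (board : List Int) : Int :=
  let placed := pvPlaced board
  (PySem.List.pyRange 0 (placed.length : Int) 1).foldl (fun threats i =>
    (PySem.List.pyRange (i + 1) (placed.length : Int) 1).foldl (fun t j =>
      let p1 := PySem.List.pyGetD placed i (0, 0)
      let p2 := PySem.List.pyGetD placed j (0, 0)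
      if p1.2 == p2.2 || (p1.2 - p2.2).natAbs == (p1.1 - p2.1).natAbs then t + 1 else t)
      threats) 0

def pvFindNext (board : List Int) : List Int → Int
  | [] => -1
  | i :: rest => if PySem.List.pyGetD board i 0 == -1 then i else pvFindNext board rest

def h2_min_conflicts_for_next_queen (board : List Int) : Int :=
  let n : Int := (board.length : Int)
  let next_col := pvFindNext board (PySem.List.pyRange 0 n 1)
  if next_col == -1 then pvH1 board
  else
    let res := (PySem.List.pyRange 0 n 1).foldl (fun (st : Option Int × Int) r =>
      let conf := (PySem.List.pyRange 0 next_col 1).foldl (fun cc c =>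
        let rp := PySem.List.pyGetD board c 0
        if rp == r || (rp - r).natAbs == (c - next_col).natAbs then cc + 1 else cc) 0
      (some (match st.1 with | none => conf | some m => min m conf), st.2 + 1)) (none, 0)
    if res.2 == 0 then 0
    else res.1.getD 0

-- ===== PORT B =====
def pvCounters (l : List (Int × Int)) :
    PySem.Dict Int Int × PySem.Dict Int Int × PySem.Dict Int Int :=
  l.foldl (fun st p =>
      (st.1.insert p.2 (st.1.getD p.2 0 + 1),
       st.2.1.insert (p.2 - p.1) (st.2.1.getD (p.2 - p.1) 0 + 1),
       st.2.2.insert (p.2 + p.1) (st.2.2.getD (p.2 + p.1) 0 + 1)))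
    (PySem.Dict.empty, PySem.Dict.empty, PySem.Dict.empty)

def h2_min_conflicts_for_next_queen_alt (board : List Int) : Int :=
  let n : Int := (board.length : Int)
  match PySem.List.index? board (-1) with
  | some nc0 =>
    let nc : Int := (nc0 : Int)
    let cs := pvCounters ((PySem.List.pyRange 0 nc 1).map
      (fun c => (c, PySem.List.pyGetD board c 0)))
    let vals := (PySem.List.pyRange 0 n 1).map (fun r =>
      cs.1.getD r 0 + cs.2.1.getD (r - nc) 0 + cs.2.2.getD (r + nc) 0)
    match PySem.List.min? vals (fun x => x) with
    | some m => m
    | none => 0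
  | none =>
    let cs := pvCounters (PySem.List.enumerate board)
    (((cs.1.values ++ cs.2.1.values ++ cs.2.2.values).map
      (fun v => PySem.Int.floordiv (v * (v - 1)) 2))).sum

-- ===== PRECONDITION & SPEC =====
def Spec_h2_min_conflicts_for_next_queen (board : List Int) (out : Int) : Prop := out = h2_min_conflicts_for_next_queen_alt board
instance (board : List Int) (out : Int) : Decidable (Spec_h2_min_conflicts_for_next_queen board out) := by unfold Spec_h2_min_conflicts_for_next_queen; infer_instance

-- ===== CLAIM (what is proved, stated in full; the proofs are below) =====
def Claim_equal_h2_min_conflicts_for_next_queen : Prop := ∀ (board : List Int), Dom_h2_min_conflicts_for_next_queen board → Spec_h2_min_conflicts_for_next_queen board (h2_min_conflicts_for_next_queen board)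

-- ===== LEMMAS AND PROOFS =====

-- ===== LEMMAS AND PROOFS =====

-- A's linear search with break over range(n) finds the first index of -1 (or -1 if absent)
theorem pvFindNext_aux (board : List Int) : ∀ (d a : Nat), board.length - a = d →
    pvFindNext board (PySem.List.pyRange (a : Int) (board.length : Int) 1) =
      (match PySem.List.index? (board.drop a) (-1) with
       | some k => ((a + k : Nat) : Int)
       | none => -1) := by
  intro d
  induction d with
  | zero =>
    intro a ha
    have hle : board.length ≤ a := by omega
    rw [PySem.List.pyRange_one_eq_nil (by exact_mod_cast hle)]
    rw [List.drop_eq_nil_of_le hle]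
    simp [pvFindNext, PySem.List.index?_eq_idxOf?]
  | succ d ih =>
    intro a ha
    have hlt : a < board.length := by omega
    rw [PySem.List.pyRange_one_cons (by exact_mod_cast hlt)]
    rw [List.drop_eq_getElem_cons hlt]
    show (if PySem.List.pyGetD board (a : Int) 0 == -1 then (a:Int)
          else pvFindNext board (PySem.List.pyRange ((a:Int)+1) (board.length : Int) 1)) = _
    rw [PySem.List.pyGetD_natCast]
    have hget : board.getD a 0 = board[a] := List.getD_eq_getElem board 0 hlt
    by_cases hx : board[a] = -1
    · rw [hget, if_pos (by simp [hx])]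
      have : List.idxOf? (-1) ((-1:Int) :: List.drop (a + 1) board) = some 0 := by
        simp [List.idxOf?_cons]
      simp [hx, this]
    · have h1 : ((a:Int) + 1) = ((a+1 : Nat) : Int) := by push_cast; ring
      rw [hget, if_neg (by simp [hx]), h1, ih (a+1) (by omega)]
      rw [PySem.List.index?_cons_of_ne _ hx]
      cases PySem.List.index? (board.drop (a+1)) (-1) with
      | none => simp
      | some k => simp; ring

theorem counter_fold {α : Type} (f : α → Int) (l : List α) :
    l.foldl (fun d x => d.insert (f x) (d.getD (f x) 0 + 1)) PySem.Dict.empty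
      = PySem.Dict.counter (l.map f) := by
  rw [← PySem.Dict.foldl_insert_getD_add_one_eq_counter, List.foldl_map]

theorem pvCounters_eq (l : List (Int × Int)) :
    pvCounters l =
      (PySem.Dict.counter (l.map (·.2)),
       PySem.Dict.counter (l.map (fun p => p.2 - p.1)),
       PySem.Dict.counter (l.map (fun p => p.2 + p.1))) := by
  unfold pvCounters
  rw [PySem.List.foldl_prod_mk
        (f := fun (d : PySem.Dict Int Int) (p : Int × Int) => d.insert p.2 (d.getD p.2 0 + 1))
        (g := fun (s : PySem.Dict Int Int × PySem.Dict Int Int) (p : Int × Int) =>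
          (s.1.insert (p.2 - p.1) (s.1.getD (p.2 - p.1) 0 + 1),
           s.2.insert (p.2 + p.1) (s.2.getD (p.2 + p.1) 0 + 1)))]
  rw [PySem.List.foldl_prod_mk
        (f := fun (d : PySem.Dict Int Int) (p : Int × Int) => d.insert (p.2 - p.1) (d.getD (p.2 - p.1) 0 + 1))
        (g := fun (d : PySem.Dict Int Int) (p : Int × Int) => d.insert (p.2 + p.1) (d.getD (p.2 + p.1) 0 + 1))]
  rw [counter_fold (fun p : Int × Int => p.2), counter_fold (fun p : Int × Int => p.2 - p.1),
      counter_fold (fun p : Int × Int => p.2 + p.1)]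

theorem pyRange_shift (a b : Int) :
    PySem.List.pyRange (a+1) (b+1) 1 = (PySem.List.pyRange a b 1).map (fun x => x + 1) := by
  rw [PySem.List.pyRange_one, PySem.List.pyRange_one]
  have h : (b + 1 - (a + 1)) = b - a := by ring
  rw [h, List.map_map]
  exact List.map_congr_left (fun k _ => by simp; ring)

theorem pyGetD_cons_shift {α : Type} (x : α) (t : List α) (d : α) (m : Int) (hm : 0 ≤ m) :
    PySem.List.pyGetD (x :: t) (m + 1) d = PySem.List.pyGetD t m d := by
  obtain ⟨k, rfl⟩ : ∃ k : Nat, (k : Int) = m := ⟨m.toNat, by omega⟩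
  have h : (k : Int) + 1 = ((k + 1 : Nat) : Int) := by push_cast; ring
  rw [h, PySem.List.pyGetD_natCast, PySem.List.pyGetD_natCast]
  simp [List.getD]

theorem pyGetD_cons_zero {α : Type} (x : α) (t : List α) (d : α) :
    PySem.List.pyGetD (x :: t) 0 d = x := by
  have h : (0 : Int) = ((0 : Nat) : Int) := rfl
  rw [h, PySem.List.pyGetD_natCast]; rfl

def pvPairs {α : Type} (pred : α → α → Bool) : List α → Int
  | [] => 0
  | x :: t => (t.countP (pred x) : Int) + pvPairs pred t

theorem pairs_loop {α : Type} (pred : α → α → Bool) (d : α) (L : List α) :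
    ((PySem.List.pyRange 0 (L.length : Int) 1).map (fun i =>
       ((PySem.List.pyRange (i+1) (L.length : Int) 1).countP
          (fun j => pred (PySem.List.pyGetD L i d) (PySem.List.pyGetD L j d)) : Int))).sum
    = pvPairs pred L := by
  induction L with
  | nil => simp [pvPairs, PySem.List.pyRange_one_eq_nil]
  | cons x t ih =>
    have hn : ((x :: t).length : Int) = (t.length : Int) + 1 := by push_cast [List.length_cons]; ring
    rw [hn, PySem.List.pyRange_one_cons (by positivity)]
    rw [List.map_cons, List.sum_cons]
    have hshift0 : PySem.List.pyRange (0+1) ((t.length : Int)+1) 1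
        = (PySem.List.pyRange 0 (t.length : Int) 1).map (fun x => x + 1) := pyRange_shift 0 _
    -- head term
    have hhead : ((PySem.List.pyRange (0+1) ((t.length : Int)+1) 1).countP
          (fun j => pred (PySem.List.pyGetD (x :: t) 0 d) (PySem.List.pyGetD (x :: t) j d)) : Int)
        = (t.countP (pred x) : Int) := by
      rw [hshift0, List.countP_map, pyGetD_cons_zero]
      have : ∀ c ∈ PySem.List.pyRange 0 (t.length : Int) 1,
          ((fun j => pred x (PySem.List.pyGetD (x :: t) j d)) ∘ (fun y => y + 1)) c
          = (fun c => pred x (PySem.List.pyGetD t c d)) c := by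
        intro c hc
        have h0 : 0 ≤ c := ((PySem.List.mem_pyRange_one).1 hc).1
        simp only [Function.comp]
        rw [pyGetD_cons_shift _ _ _ _ h0]
      rw [List.countP_congr (fun c hc => by rw [this c hc])]
      have hm : (PySem.List.pyRange 0 (t.length : Int) 1).map (fun j => PySem.List.pyGetD t j d) = t := by
        simpa using PySem.List.map_pyGetD_pyRange_zero' t d
      conv_rhs => rw [← hm]
      rw [List.countP_map]
      rfl
    rw [hhead]
    -- tail sum
    have htail : ((PySem.List.pyRange (0+1) ((t.length : Int)+1) 1).map (fun i =>
          ((PySem.List.pyRange (i+1) ((t.length : Int)+1) 1).countP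
            (fun j => pred (PySem.List.pyGetD (x :: t) i d) (PySem.List.pyGetD (x :: t) j d)) : Int))).sum
        = ((PySem.List.pyRange 0 (t.length : Int) 1).map (fun i =>
          ((PySem.List.pyRange (i+1) (t.length : Int) 1).countP
            (fun j => pred (PySem.List.pyGetD t i d) (PySem.List.pyGetD t j d)) : Int))).sum := by
      rw [hshift0, List.map_map]
      congr 1
      apply List.map_congr_left
      intro c hc
      have h0 : 0 ≤ c := ((PySem.List.mem_pyRange_one).1 hc).1
      simp only [Function.comp]
      rw [pyGetD_cons_shift _ _ _ _ h0]
      have hsh : PySem.List.pyRange (c + 1 + 1) ((t.length : Int) + 1) 1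
          = (PySem.List.pyRange (c+1) (t.length : Int) 1).map (fun y => y + 1) := pyRange_shift _ _
      rw [hsh, List.countP_map]
      congr 1
      apply List.countP_congr
      intro j hj
      have hj0 : 0 ≤ j := by
        have := (PySem.List.mem_pyRange_one).1 hj
        omega
      simp only [Function.comp]
      rw [pyGetD_cons_shift _ _ _ _ hj0]
      
    rw [htail, ih]
    rfl

def pvCnt : List Int → Int
  | [] => 0
  | x :: t => (t.count x : Int) + pvCnt t

def pvC (v : Int) : Int := PySem.Int.floordiv (v * (v - 1)) 2

theorem pvC_zero : pvC 0 = 0 := by decide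

theorem pvC_succ (m : Nat) : pvC ((m : Int) + 1) = pvC (m : Int) + m := by
  unfold pvC
  rw [PySem.Int.floordiv_eq_ediv_of_pos (by norm_num), PySem.Int.floordiv_eq_ediv_of_pos (by norm_num)]
  have h : ((m : Int) + 1) * ((m : Int) + 1 - 1) = (m : Int) * ((m : Int) - 1) + (m : Int) * 2 := by ring
  rw [h, Int.add_mul_ediv_right _ _ (by norm_num)]

theorem sum_single_diff (x : Int) (f g : Int → Int) (hfg : ∀ k, k ≠ x → f k = g k) :
    ∀ (S : List Int), S.Nodup → x ∈ S →
    (S.map f).sum = (S.map g).sum + (f x - g x) := by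
  intro S
  induction S with
  | nil => simp
  | cons y S' ih =>
    intro hnd hmem
    have hnd' := (List.nodup_cons.1 hnd).2
    have hy := (List.nodup_cons.1 hnd).1
    by_cases hyx : y = x
    · subst hyx
      have : S'.map f = S'.map g := List.map_congr_left (fun k hk => hfg k (fun h => hy (h ▸ hk)))
      simp [this]; ring
    · have hx' : x ∈ S' := by
        rcases List.mem_cons.1 hmem with h | h
        · exact absurd h.symm hyx
        · exact h
      simp only [List.map_cons, List.sum_cons, ih hnd' hx', hfg y hyx]
      ring

theorem values_sum (ks : List Int) : ∀ (S : List Int), S.Nodup → (∀ k ∈ ks, k ∈ S) →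
    (S.map (fun k => pvC ((ks.count k : Int)))).sum = pvCnt ks := by
  induction ks with
  | nil =>
    intro S _ _
    have h : (S.map (fun k => pvC ((([] : List Int).count k : Int)))) = S.map (fun _ => 0) := by
      apply List.map_congr_left; intro k _; simp [pvC_zero]
    rw [h]; simp [pvCnt]
  | cons x t ih =>
    intro S hnd hmem
    have hx : x ∈ S := hmem x (List.mem_cons_self)
    have hfg : ∀ k, k ≠ x → (fun k => pvC (((x :: t).count k : Int))) k = (fun k => pvC ((t.count k : Int))) k := by
      intro k hk
      simp only [List.count_cons]
      rw [if_neg (by simp [Ne.symm hk])]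
      simp
    rw [sum_single_diff x _ _ hfg S hnd hx]
    rw [ih S hnd (fun k hk => hmem k (List.mem_cons_of_mem _ hk))]
    have hcx : (((x :: t).count x : Int)) = ((t.count x : Int)) + 1 := by
      simp

    have : pvC (((x :: t).count x : Int)) - pvC ((t.count x : Int)) = (t.count x : Int) := by
      rw [hcx, pvC_succ]; ring
    rw [this, show pvCnt (x :: t) = (t.count x : Int) + pvCnt t from rfl]
    ring

-- split of A's attack test into the three exclusive key-equalities, per candidate column list
theorem countP_split_cols (board : List Int) (nc r : Int) :
    ∀ (l : List Int), (∀ c ∈ l, c < nc) →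
    ((l.countP (fun c => (PySem.List.pyGetD board c 0 == r)
        || ((PySem.List.pyGetD board c 0 - r).natAbs == (c - nc).natAbs))) : Int)
    = ((l.countP (fun c => PySem.List.pyGetD board c 0 == r)) : Int)
    + ((l.countP (fun c => PySem.List.pyGetD board c 0 - c == r - nc)) : Int)
    + ((l.countP (fun c => PySem.List.pyGetD board c 0 + c == r + nc)) : Int) := by
  intro l
  induction l with
  | nil => simp
  | cons c l' ih =>
    intro h
    have hc : c < nc := h c List.mem_cons_self
    have ih' := ih (fun c' hc' => h c' (List.mem_cons_of_mem _ hc'))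
    simp only [List.countP_cons]
    push_cast
    rw [show ((l'.countP (fun c => (PySem.List.pyGetD board c 0 == r)
        || ((PySem.List.pyGetD board c 0 - r).natAbs == (c - nc).natAbs))) : Int) = _ from ih']
    set rp := PySem.List.pyGetD board c 0 with hrp
    have hpt : (if (rp == r) || ((rp - r).natAbs == (c - nc).natAbs) then (1:Int) else 0)
        = (if rp == r then (1:Int) else 0) + (if rp - c == r - nc then (1:Int) else 0)
          + (if rp + c == r + nc then (1:Int) else 0) := by
      simp only [beq_iff_eq, Bool.or_eq_true]
      split_ifs <;> omega
    rw [hpt]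
    ring

-- split of A's attack test for pairs of placed queens (distinct columns)
theorem countP_split_pairs (x : Int × Int) :
    ∀ (t : List (Int × Int)), (∀ y ∈ t, x.1 < y.1) →
    ((t.countP (fun y => (x.2 == y.2) || ((x.2 - y.2).natAbs == (x.1 - y.1).natAbs))) : Int)
    = ((t.countP (fun y => y.2 == x.2)) : Int)
    + ((t.countP (fun y => y.2 - y.1 == x.2 - x.1)) : Int)
    + ((t.countP (fun y => y.2 + y.1 == x.2 + x.1)) : Int) := by
  intro t
  induction t with
  | nil => simp
  | cons y t' ih =>
    intro h
    have hy : x.1 < y.1 := h y List.mem_cons_self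
    have ih' := ih (fun y' hy' => h y' (List.mem_cons_of_mem _ hy'))
    simp only [List.countP_cons]
    push_cast
    rw [show ((t'.countP (fun y => (x.2 == y.2) || ((x.2 - y.2).natAbs == (x.1 - y.1).natAbs))) : Int) = _ from ih']
    have hpt : (if (x.2 == y.2) || ((x.2 - y.2).natAbs == (x.1 - y.1).natAbs) then (1:Int) else 0)
        = (if y.2 == x.2 then (1:Int) else 0) + (if y.2 - y.1 == x.2 - x.1 then (1:Int) else 0)
          + (if y.2 + y.1 == x.2 + x.1 then (1:Int) else 0) := by
      simp only [beq_iff_eq, Bool.or_eq_true]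
      split_ifs <;> omega
    rw [hpt]
    ring

-- A's running-min loop (None = float('inf')) over a nonempty list is foldl min
theorem minfold_aux (g : Int → Int) :
    ∀ (t : List Int) (m : Int),
    t.foldl (fun (o : Option Int) r => some (match o with | none => g r | some m' => min m' (g r))) (some m)
      = some ((t.map g).foldl min m) := by
  intro t
  induction t with
  | nil => intro m; simp
  | cons r t' ih => intro m; simp [ih]

theorem minfold_cons (g : Int → Int) (x : Int) (t : List Int) :
    (x :: t).foldl (fun (o : Option Int) r => some (match o with | none => g r | some m' => min m' (g r))) none
      = some ((t.map g).foldl min (g x)) := by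
  simp [minfold_aux]

theorem pvFindNext_eq (board : List Int) :
    pvFindNext board (PySem.List.pyRange 0 (board.length : Int) 1) =
      (match PySem.List.index? board (-1) with
       | some k => (k : Int)
       | none => -1) := by
  have h := pvFindNext_aux board (board.length - 0) 0 (by omega)
  simpa using h

theorem count_map_eq_countP {α : Type} (f : α → Int) (l : List α) (v : Int) :
    (l.map f).count v = l.countP (fun c => f c == v) := by
  rw [List.count, List.countP_map]
  rfl

theorem foldl_len {α : Type} (l : List α) : ∀ (a : Int), l.foldl (fun c _ => c + 1) a = a + (l.length : Int) := by
  induction l with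
  | nil => intro a; simp
  | cons x t ih => intro a; simp [ih]; ring

def pvPred : Int × Int → Int × Int → Bool :=
  fun p1 p2 => p1.2 == p2.2 || (p1.2 - p2.2).natAbs == (p1.1 - p2.1).natAbs

theorem pairs_split : ∀ (L : List (Int × Int)), L.Pairwise (fun p q => p.1 < q.1) →
    pvPairs pvPred L
      = pvCnt (L.map (·.2)) + pvCnt (L.map (fun p => p.2 - p.1)) + pvCnt (L.map (fun p => p.2 + p.1)) := by
  intro L
  induction L with
  | nil => simp [pvPairs, pvCnt]
  | cons x t ih =>
    intro hp
    have hx : ∀ y ∈ t, x.1 < y.1 := (List.pairwise_cons.1 hp).1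
    have ih' := ih (List.pairwise_cons.1 hp).2
    show (t.countP (pvPred x) : Int) + pvPairs pvPred t = _
    rw [ih']
    have hsplit := countP_split_pairs x t hx
    rw [show (t.countP (pvPred x) : Int)
        = ((t.countP (fun y => (x.2 == y.2) || ((x.2 - y.2).natAbs == (x.1 - y.1).natAbs))) : Int) from rfl,
      hsplit]
    rw [show pvCnt ((x :: t).map (·.2)) = ((t.map (·.2)).count x.2 : Int) + pvCnt (t.map (·.2)) from rfl,
        show pvCnt ((x :: t).map (fun p => p.2 - p.1))
          = ((t.map (fun p => p.2 - p.1)).count (x.2 - x.1) : Int) + pvCnt (t.map (fun p => p.2 - p.1)) from rfl,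
        show pvCnt ((x :: t).map (fun p => p.2 + p.1))
          = ((t.map (fun p => p.2 + p.1)).count (x.2 + x.1) : Int) + pvCnt (t.map (fun p => p.2 + p.1)) from rfl]
    rw [count_map_eq_countP, count_map_eq_countP, count_map_eq_countP]
    ring

theorem sum_values_pvC (ks : List Int) :
    (((PySem.Dict.counter ks).values).map (fun v => PySem.Int.floordiv (v * (v - 1)) 2)).sum = pvCnt ks := by
  have hv : (PySem.Dict.counter ks).values = (PySem.Set.ofList ks).map (fun k => ((ks.count k : Int))) := by
    show ((PySem.Dict.counter ks).items).map (·.2) = _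
    rw [PySem.Dict.items_counter, List.map_map]
    rfl
  rw [hv, List.map_map]
  have h := values_sum ks (PySem.Set.ofList ks) (PySem.Set.nodup_ofList ks)
    (fun k hk => (PySem.Set.mem_ofList ks k).2 hk)
  calc ((PySem.Set.ofList ks).map ((fun v => PySem.Int.floordiv (v * (v - 1)) 2) ∘ fun k => ((ks.count k : Int)))).sum
      = ((PySem.Set.ofList ks).map (fun k => pvC ((ks.count k : Int)))).sum := rfl
    _ = pvCnt ks := h

theorem branch_none (board : List Int) (hk : PySem.List.index? board (-1) = none) :
    h2_min_conflicts_for_next_queen board = h2_min_conflicts_for_next_queen_alt board := by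
  have hmem : (-1 : Int) ∉ board := (PySem.List.index?_eq_none_iff board (-1)).1 hk
  have hplaced : pvPlaced board = PySem.List.enumerate board := by
    unfold pvPlaced
    rw [PySem.List.foldl_append_if]
    have hf : (PySem.List.enumerate board).filter (fun p => p.2 != -1) = PySem.List.enumerate board := by
      apply List.filter_eq_self.2
      intro p hp
      have h2 : p.2 ∈ board := by
        have := List.mem_map_of_mem (f := fun q : Int × Int => q.2) hp
        rwa [PySem.List.map_snd_enumerate] at this
      simp only [bne_iff_ne, ne_eq]
      intro hc
      exact hmem (hc ▸ h2)
    rw [hf]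
    simp
  have hA : pvH1 board = pvPairs pvPred (PySem.List.enumerate board) := by
    unfold pvH1
    simp only [PySem.List.foldl_if_add_one, PySem.List.foldl_add, zero_add]
    rw [hplaced]
    exact pairs_loop pvPred (0, 0) (PySem.List.enumerate board)
  have hcs := pvCounters_eq (PySem.List.enumerate board)
  have hK1 : (PySem.List.enumerate board).map (·.2) = board := PySem.List.map_snd_enumerate board 0
  show (if pvFindNext board (PySem.List.pyRange 0 (board.length : Int) 1) == -1 then pvH1 board else _) = _
  rw [pvFindNext_eq, hk]
  show pvH1 board = h2_min_conflicts_for_next_queen_alt board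
  unfold h2_min_conflicts_for_next_queen_alt
  rw [hk]
  show pvH1 board =
    (((pvCounters (PySem.List.enumerate board)).1.values
      ++ (pvCounters (PySem.List.enumerate board)).2.1.values
      ++ (pvCounters (PySem.List.enumerate board)).2.2.values).map
        (fun v => PySem.Int.floordiv (v * (v - 1)) 2)).sum
  rw [hcs]
  simp only [List.map_append, List.sum_append]
  rw [sum_values_pvC, sum_values_pvC, sum_values_pvC]
  rw [hA, pairs_split _ (PySem.List.pairwise_lt_enumerate board 0), hK1]

theorem branch_some (board : List Int) (k : Nat) (hk : PySem.List.index? board (-1) = some k) :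
    h2_min_conflicts_for_next_queen board = h2_min_conflicts_for_next_queen_alt board := by
  obtain ⟨hklt, hbk, hprev⟩ := PySem.List.getElem_of_index?_eq_some hk
  have hn1 : 1 ≤ (board.length : Int) := by exact_mod_cast Nat.one_le_iff_ne_zero.2 (by omega)
  show (if pvFindNext board (PySem.List.pyRange 0 (board.length : Int) 1) == -1 then pvH1 board else _) = _
  rw [pvFindNext_eq, hk]
  show (if ((k : Int) == -1) then pvH1 board else _) = _
  rw [if_neg (by simp)]
  -- name the two per-candidate conflict counters
  set gA : Int → Int := fun r => (PySem.List.pyRange 0 (k : Int) 1).foldl (fun cc c =>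
      let rp := PySem.List.pyGetD board c 0
      if rp == r || (rp - r).natAbs == (c - (k : Int)).natAbs then cc + 1 else cc) 0 with hgA
  show (let res := (PySem.List.pyRange 0 (board.length : Int) 1).foldl (fun (st : Option Int × Int) r =>
      (some (match st.1 with | none => gA r | some m => min m (gA r)), st.2 + 1)) (none, 0)
    if res.2 == 0 then 0 else res.1.getD 0) = _
  rw [PySem.List.foldl_prod_mk
      (f := fun (o : Option Int) r => some (match o with | none => gA r | some m => min m (gA r)))
      (g := fun (c : Int) (_ : Int) => c + 1)]
  rw [foldl_len]
  have hlen : (0 : Int) + (((PySem.List.pyRange 0 (board.length : Int) 1).length : Nat) : Int)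
      = (board.length : Int) := by
    simp [PySem.List.length_pyRange_one]
  rw [hlen]
  have hcons : PySem.List.pyRange 0 (board.length : Int) 1
      = 0 :: PySem.List.pyRange 1 (board.length : Int) 1 := by
    have := PySem.List.pyRange_one_cons (a := 0) (b := (board.length : Int)) (by omega)
    simpa using this
  show (if ((board.length : Int) == 0) then (0 : Int) else
      ((PySem.List.pyRange 0 (board.length : Int) 1).foldl (fun o r =>
        some (match o with | none => gA r | some m => min m (gA r))) none).getD 0) = _
  rw [if_neg (by simp only [beq_iff_eq]; omega)]
  rw [hcons, minfold_cons, Option.getD_some]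
  -- B side
  set cs := pvCounters ((PySem.List.pyRange 0 (k : Int) 1).map
      (fun c => (c, PySem.List.pyGetD board c 0))) with hcs
  set gB : Int → Int := fun r =>
      cs.1.getD r 0 + cs.2.1.getD (r - (k : Int)) 0 + cs.2.2.getD (r + (k : Int)) 0 with hgB
  have hB : h2_min_conflicts_for_next_queen_alt board
      = ((PySem.List.pyRange 1 (board.length : Int) 1).map gB).foldl min (gB 0) := by
    unfold h2_min_conflicts_for_next_queen_alt
    rw [hk]
    show (match PySem.List.min? ((PySem.List.pyRange 0 (board.length : Int) 1).map gB)
            (fun x => x) with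
          | some m => m | none => 0) = _
    rw [hcons, List.map_cons, PySem.List.min?_id_cons]
  rw [hB]
  have hg : ∀ r : Int, gA r = gB r := by
    intro r
    have hA : gA r = ((PySem.List.pyRange 0 (k : Int) 1).countP (fun c =>
        (PySem.List.pyGetD board c 0 == r)
        || ((PySem.List.pyGetD board c 0 - r).natAbs == (c - (k : Int)).natAbs)) : Int) := by
      rw [hgA]
      show (PySem.List.pyRange 0 (k : Int) 1).foldl (fun cc c =>
          if (PySem.List.pyGetD board c 0 == r)
            || ((PySem.List.pyGetD board c 0 - r).natAbs == (c - (k : Int)).natAbs)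
          then cc + 1 else cc) 0 = _
      rw [PySem.List.foldl_if_add_one]
      ring
    rw [hA, countP_split_cols board (k : Int) r _
        (fun c hc => ((PySem.List.mem_pyRange_one).1 hc).2)]
    rw [hgB, hcs, pvCounters_eq]
    have hm1 : (((PySem.List.pyRange 0 (k : Int) 1).map
        (fun c => (c, PySem.List.pyGetD board c 0))).map (·.2))
        = (PySem.List.pyRange 0 (k : Int) 1).map (fun c => PySem.List.pyGetD board c 0) := by
      rw [List.map_map]; rfl
    have hm2 : (((PySem.List.pyRange 0 (k : Int) 1).map
        (fun c => (c, PySem.List.pyGetD board c 0))).map (fun p => p.2 - p.1))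
        = (PySem.List.pyRange 0 (k : Int) 1).map (fun c => PySem.List.pyGetD board c 0 - c) := by
      rw [List.map_map]; rfl
    have hm3 : (((PySem.List.pyRange 0 (k : Int) 1).map
        (fun c => (c, PySem.List.pyGetD board c 0))).map (fun p => p.2 + p.1))
        = (PySem.List.pyRange 0 (k : Int) 1).map (fun c => PySem.List.pyGetD board c 0 + c) := by
      rw [List.map_map]; rfl
    show _ = (PySem.Dict.counter (((PySem.List.pyRange 0 (k : Int) 1).map
        (fun c => (c, PySem.List.pyGetD board c 0))).map (·.2))).getD r 0
      + (PySem.Dict.counter (((PySem.List.pyRange 0 (k : Int) 1).map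
        (fun c => (c, PySem.List.pyGetD board c 0))).map (fun p => p.2 - p.1))).getD (r - (k : Int)) 0
      + (PySem.Dict.counter (((PySem.List.pyRange 0 (k : Int) 1).map
        (fun c => (c, PySem.List.pyGetD board c 0))).map (fun p => p.2 + p.1))).getD (r + (k : Int)) 0
    rw [hm1, hm2, hm3, PySem.Dict.getD_counter, PySem.Dict.getD_counter, PySem.Dict.getD_counter,
        count_map_eq_countP, count_map_eq_countP, count_map_eq_countP]
  rw [List.map_congr_left (fun r _ => hg r), hg 0]

-- ===== VERDICT (by name: the statement is the Claim_ definition above) =====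
theorem h2_min_conflicts_for_next_queen_spec : Claim_equal_h2_min_conflicts_for_next_queen := by
  intro board _
  unfold Spec_h2_min_conflicts_for_next_queen
  cases hk : PySem.List.index? board (-1) with
  | some k => exact branch_some board k hk
  | none => exact branch_none board hk
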